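-- pv_equiv track=rewrite | github.com/broersma/advent-of-code-2018 | 13_1.py | show_grid
-- ===== SOURCE A (Python) =====
-- def show_grid(grid, carts):
--     text = ""
--     y = 0
--     for line in grid:
--         for x, c in enumerate(line):
--             for cart in carts:
--                 if cart[0] == x and cart[1] == y:
--                     c = cart[2]
--             text += c
--         text += "\n"
--         y += 1
--     return text
-- ===== SOURCE B (Python) =====
-- def show_grid(grid, carts):
--     rows = [list(line) for line in grid]
--     for cart in carts:
--         x, y = cart[0], cart[1]
--         if 0 <= y < len(rows) and 0 <= x < len(rows[y]):
--             rows[y][x] = cart[2]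
--     return "".join("".join(row) + "\n" for row in rows)
-- ===== Notes on version B (the rewrite author's own statement) =====
-- stated objective: faster
-- what changed: Instead of scanning the whole cart list for every grid cell, B writes each cart character once into a mutable 2-D array of the grid and joins the rows, turning the per-cell cart scan into a single pass over the carts.
import Mathlib
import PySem

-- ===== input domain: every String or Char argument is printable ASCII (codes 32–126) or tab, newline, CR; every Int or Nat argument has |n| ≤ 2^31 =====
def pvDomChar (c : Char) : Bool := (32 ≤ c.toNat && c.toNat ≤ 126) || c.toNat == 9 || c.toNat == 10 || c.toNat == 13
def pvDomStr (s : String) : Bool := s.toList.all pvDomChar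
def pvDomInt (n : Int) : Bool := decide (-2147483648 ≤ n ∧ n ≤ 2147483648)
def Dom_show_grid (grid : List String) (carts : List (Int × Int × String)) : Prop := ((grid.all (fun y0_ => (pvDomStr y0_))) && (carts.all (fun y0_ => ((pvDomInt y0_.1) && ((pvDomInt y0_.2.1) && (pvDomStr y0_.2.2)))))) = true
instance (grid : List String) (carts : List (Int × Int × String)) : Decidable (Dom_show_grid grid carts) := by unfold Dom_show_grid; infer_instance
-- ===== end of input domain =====

-- B writes each cart once into a 2-D array of the grid instead of scanning all carts per cell (return value only; neither version mutates its arguments).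

-- ===== PORT A =====
-- literal port of A: running text, y counter, per-cell scan over carts
def show_grid (grid : List String) (carts : List (Int × Int × String)) : String :=
  (grid.foldl (fun (acc : String × Int) line =>
      ((PySem.List.enumerate line.toList 0).foldl
        (fun (t : String) (p : Int × Char) =>
          t ++ carts.foldl (fun (c : String) cart =>
            if cart.1 = p.1 ∧ cart.2.1 = acc.2 then cart.2.2 else c) (String.singleton p.2))
        acc.1 ++ "\n", acc.2 + 1))
    ("", 0)).1

-- ===== PORT B =====
-- the body of B's cart loop: guarded write rows[y][x] = ch
def pvBStep (rows : List (List String)) (cart : Int × Int × String) : List (List String) :=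
  if 0 ≤ cart.2.1 ∧ cart.2.1 < (rows.length : Int) then
    if 0 ≤ cart.1 ∧ cart.1 < ((rows.getD cart.2.1.toNat []).length : Int) then
      rows.set cart.2.1.toNat ((rows.getD cart.2.1.toNat []).set cart.1.toNat cart.2.2)
    else rows
  else rows

def show_grid_alt (grid : List String) (carts : List (Int × Int × String)) : String :=
  PySem.Str.join ""
    ((carts.foldl pvBStep (grid.map (fun line => line.toList.map (fun c => String.singleton c)))).map
      (fun row => PySem.Str.join "" row ++ "\n"))

-- ===== PRECONDITION & SPEC =====
def Spec_show_grid (grid : List String) (carts : List (Int × Int × String)) (out : String) : Prop := out = show_grid_alt grid carts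
instance (grid : List String) (carts : List (Int × Int × String)) (out : String) : Decidable (Spec_show_grid grid carts out) := by unfold Spec_show_grid; infer_instance

-- ===== CLAIM (what is proved, stated in full; the proofs are below) =====
def Claim_equal_show_grid : Prop := ∀ (grid : List String) (carts : List (Int × Int × String)), Dom_show_grid grid carts → Spec_show_grid grid carts (show_grid grid carts)

-- ===== LEMMAS AND PROOFS =====

-- the character finally printed at column x of row y, starting from c0
def pvCell (carts : List (Int × Int × String)) (x y : Int) (c0 : String) : String :=
  carts.foldl (fun c cart => if cart.1 = x ∧ cart.2.1 = y then cart.2.2 else c) c0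

-- the whole rendered text (as a char list) from row counter y on
def pvSpec (carts : List (Int × Int × String)) : List String → Int → List Char
  | [], _ => []
  | line :: rest, y =>
      (PySem.List.enumerate line.toList 0).flatMap
        (fun p => (pvCell carts p.1 y (String.singleton p.2)).toList)
      ++ '\n' :: pvSpec carts rest (y + 1)

-- B's grid of final cell strings, written out cell by cell
def pvRows (carts : List (Int × Int × String)) (grid : List String) : List (List String) :=
  (PySem.List.enumerate grid 0).map
    (fun q => (PySem.List.enumerate q.2.toList 0).map
      (fun p => pvCell carts p.1 q.1 (String.singleton p.2)))

lemma pv_chars_join_nil : ∀ (l : List (List Char)), PySem.Chars.join [] l = l.flatten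
  | [] => by simp [PySem.Chars.join, List.intercalate, List.intersperse]
  | [a] => by simp [PySem.Chars.join, List.intercalate, List.intersperse]
  | a :: b :: l => by
      rw [PySem.Chars.join_cons_cons, pv_chars_join_nil (b :: l)]
      simp

lemma pv_join_toList (parts : List String) :
    (PySem.Str.join "" parts).toList = (parts.map String.toList).flatten := by
  simp [pysem, pv_chars_join_nil]

lemma pv_foldl_append_toList {α : Type} (g : α → String) (l : List α) (t : String) :
    (l.foldl (fun acc x => acc ++ g x) t).toList = t.toList ++ l.flatMap (fun x => (g x).toList) := by
  induction l generalizing t with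
  | nil => simp
  | cons a l ih => simp [List.foldl_cons, ih]

lemma pv_A_char (carts : List (Int × Int × String)) :
    ∀ (grid : List String) (t : String) (y : Int),
    ((grid.foldl (fun (acc : String × Int) line =>
      ((PySem.List.enumerate line.toList 0).foldl
        (fun (t : String) (p : Int × Char) =>
          t ++ carts.foldl (fun (c : String) cart =>
            if cart.1 = p.1 ∧ cart.2.1 = acc.2 then cart.2.2 else c) (String.singleton p.2))
        acc.1 ++ "\n", acc.2 + 1))
    (t, y)).1).toList = t.toList ++ pvSpec carts grid y := by
  intro grid
  induction grid with
  | nil => intro t y; simp [pvSpec]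
  | cons line rest ih =>
      intro t y
      simp only [List.foldl_cons]
      rw [ih]
      simp [pvSpec, pvCell, pv_foldl_append_toList]

lemma pv_shape_step (rows : List (List String)) (cart : Int × Int × String) :
    (pvBStep rows cart).map List.length = rows.map List.length := by
  unfold pvBStep
  by_cases h1 : 0 ≤ cart.2.1 ∧ cart.2.1 < (rows.length : Int)
  · rw [if_pos h1]
    by_cases h2 : 0 ≤ cart.1 ∧ cart.1 < ((rows.getD cart.2.1.toNat []).length : Int)
    · rw [if_pos h2, List.map_set, List.length_set]
      have hyt : cart.2.1.toNat < rows.length := by omega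
      rw [List.getD_eq_getElem _ _ hyt]
      have hyt2 : cart.2.1.toNat < (rows.map List.length).length := by simpa using hyt
      have h3 : (rows[cart.2.1.toNat]'hyt).length = (rows.map List.length)[cart.2.1.toNat]'hyt2 := by simp
      rw [h3, List.set_getElem_self]
    · rw [if_neg h2]
  · rw [if_neg h1]

lemma pv_len_fold (carts : List (Int × Int × String)) (rows : List (List String)) :
    (carts.foldl pvBStep rows).map List.length = rows.map List.length := by
  induction carts generalizing rows with
  | nil => rfl
  | cons c cs ih => rw [List.foldl_cons, ih, pv_shape_step]

lemma pv_length_fold (carts : List (Int × Int × String)) (rows : List (List String)) :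
    (carts.foldl pvBStep rows).length = rows.length := by
  simpa using congrArg List.length (pv_len_fold carts rows)

lemma pv_rowlen_fold (carts : List (Int × Int × String)) (rows : List (List String))
    (yn : Nat) (hy : yn < rows.length) :
    ((carts.foldl pvBStep rows).getD yn []).length = (rows.getD yn []).length := by
  have hy' : yn < (carts.foldl pvBStep rows).length := by rw [pv_length_fold]; exact hy
  have h := congrArg (fun l => l[yn]?) (pv_len_fold carts rows)
  simp only [List.getElem?_map] at h
  rw [List.getElem?_eq_getElem hy', List.getElem?_eq_getElem hy] at h
  rw [List.getD_eq_getElem _ _ hy', List.getD_eq_getElem _ _ hy]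
  simpa using h

lemma pv_cell_step (rows : List (List String)) (cart : Int × Int × String)
    (yn xn : Nat) (hy : yn < rows.length) (hx : xn < (rows.getD yn []).length) :
    ((pvBStep rows cart).getD yn []).getD xn "" =
      if cart.1 = (xn : Int) ∧ cart.2.1 = (yn : Int) then cart.2.2
      else (rows.getD yn []).getD xn "" := by
  have hgr : rows.getD yn [] = rows[yn]'hy := List.getD_eq_getElem rows [] hy
  unfold pvBStep
  by_cases hcy : 0 ≤ cart.2.1 ∧ cart.2.1 < (rows.length : Int)
  · rw [if_pos hcy]
    by_cases hcx : 0 ≤ cart.1 ∧ cart.1 < ((rows.getD cart.2.1.toNat []).length : Int)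
    · rw [if_pos hcx]
      by_cases hyy : cart.2.1 = (yn : Int)
      · have hytn : cart.2.1.toNat = yn := by omega
        rw [hytn]
        have hset : yn < (rows.set yn ((rows.getD yn []).set cart.1.toNat cart.2.2)).length := by
          simpa using hy
        rw [List.getD_eq_getElem _ _ hset, List.getElem_set_self]
        by_cases hxx : cart.1 = (xn : Int)
        · have hxtn : cart.1.toNat = xn := by omega
          have hxb : xn < ((rows.getD yn []).set cart.1.toNat cart.2.2).length := by simpa using hx
          rw [List.getD_eq_getElem _ _ hxb, if_pos ⟨hxx, hyy⟩]
          subst hxtn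
          simp
        · have hne : cart.1.toNat ≠ xn := by omega
          have hxb : xn < ((rows.getD yn []).set cart.1.toNat cart.2.2).length := by simpa using hx
          rw [List.getD_eq_getElem _ _ hxb, List.getElem_set_ne hne,
            if_neg (by rintro ⟨hh1, _⟩; exact hxx hh1), List.getD_eq_getElem _ _ hx]
      · have hne : cart.2.1.toNat ≠ yn := by omega
        have hset : yn < (rows.set cart.2.1.toNat ((rows.getD cart.2.1.toNat []).set cart.1.toNat cart.2.2)).length := by
          simpa using hy
        rw [List.getD_eq_getElem _ _ hset, List.getElem_set_ne hne,
          if_neg (by rintro ⟨_, hh2⟩; exact hyy hh2), hgr]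
    · rw [if_neg hcx]
      have hno : ¬ (cart.1 = (xn : Int) ∧ cart.2.1 = (yn : Int)) := by
        rintro ⟨h1, h2⟩
        have hytn : cart.2.1.toNat = yn := by omega
        rw [hytn] at hcx
        omega
      rw [if_neg hno]
  · rw [if_neg hcy]
    have hno : ¬ (cart.1 = (xn : Int) ∧ cart.2.1 = (yn : Int)) := by
      rintro ⟨h1, h2⟩
      omega
    rw [if_neg hno]

lemma pv_cell_fold (carts : List (Int × Int × String)) (rows : List (List String))
    (yn xn : Nat) (hy : yn < rows.length) (hx : xn < (rows.getD yn []).length) :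
    ((carts.foldl pvBStep rows).getD yn []).getD xn "" =
      pvCell carts (xn : Int) (yn : Int) ((rows.getD yn []).getD xn "") := by
  induction carts generalizing rows with
  | nil => simp [pvCell]
  | cons c cs ih =>
      have hlen : (pvBStep rows c).length = rows.length := by
        simpa using congrArg List.length (pv_shape_step rows c)
      have hy' : yn < (pvBStep rows c).length := by omega
      have hrow : ((pvBStep rows c).getD yn []).length = (rows.getD yn []).length := by
        have h := congrArg (fun l => l[yn]?) (pv_shape_step rows c)
        simp only [List.getElem?_map] at h
        rw [List.getElem?_eq_getElem hy', List.getElem?_eq_getElem hy] at h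
        rw [List.getD_eq_getElem _ _ hy', List.getD_eq_getElem _ _ hy]
        simpa using h
      have hx' : xn < ((pvBStep rows c).getD yn []).length := by omega
      rw [List.foldl_cons, ih (pvBStep rows c) hy' hx', pv_cell_step rows c yn xn hy hx]
      simp [pvCell]

lemma pv_rows_eq (carts : List (Int × Int × String)) (grid : List String) :
    carts.foldl pvBStep (grid.map (fun line => line.toList.map (fun c => String.singleton c))) = pvRows carts grid := by
  set rows0 := grid.map (fun line => line.toList.map (fun c => String.singleton c)) with hrows0
  have hlen : (carts.foldl pvBStep rows0).length = grid.length := by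
    rw [pv_length_fold, hrows0, List.length_map]
  apply List.ext_getElem
  · rw [hlen]
    simp [pvRows]
  · intro yn h1 h2
    have hyg : yn < grid.length := by rw [← hlen]; exact h1
    have hyn : yn < rows0.length := by simpa [hrows0] using hyg
    have hrow0 : rows0.getD yn [] = (grid[yn]'hyg).toList.map (fun c => String.singleton c) := by
      rw [List.getD_eq_getElem _ _ hyn]
      simp [hrows0]
    have hrl := pv_rowlen_fold carts rows0 yn hyn
    have e1 : (carts.foldl pvBStep rows0)[yn]'h1 = (carts.foldl pvBStep rows0).getD yn [] :=
      (List.getD_eq_getElem _ _ h1).symm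
    apply List.ext_getElem
    · rw [e1, hrl, hrow0]
      simp [pvRows, PySem.List.getElem_enumerate]
    · intro xn hx1 hx2
      have hx1' : xn < ((carts.foldl pvBStep rows0).getD yn []).length := by rw [← e1]; exact hx1
      have hx0 : xn < (rows0.getD yn []).length := by rw [← hrl]; exact hx1'
      have e2 : ((carts.foldl pvBStep rows0).getD yn [])[xn]'hx1' = ((carts.foldl pvBStep rows0).getD yn []).getD xn "" :=
        (List.getD_eq_getElem _ _ hx1').symm
      have hxg : xn < (grid[yn]'hyg).toList.length := by
        rw [hrow0] at hx0
        simpa using hx0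
      have hx0' : xn < ((grid[yn]'hyg).toList.map (fun c => String.singleton c)).length := by
        rw [← hrow0]; exact hx0
      have hcellv : (rows0.getD yn []).getD xn "" = String.singleton ((grid[yn]'hyg).toList[xn]'hxg) := by
        rw [hrow0, List.getD_eq_getElem _ _ hx0']
        simp
      have q1 := congrArg (fun l => l[xn]?) e1
      simp only at q1
      rw [List.getElem?_eq_getElem hx1] at q1
      have q2 : ((List.foldl pvBStep rows0 carts).getD yn [])[xn]? = some (((List.foldl pvBStep rows0 carts).getD yn []).getD xn "") := by
        rw [List.getElem?_eq_getElem hx1', List.getD_eq_getElem _ _ hx1']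
      have key : ((List.foldl pvBStep rows0 carts)[yn]'h1)[xn]'hx1 = ((List.foldl pvBStep rows0 carts).getD yn []).getD xn "" :=
        Option.some.inj (q1.trans q2)
      rw [key, pv_cell_fold carts rows0 yn xn hyn hx0, hcellv]
      simp [pvRows, PySem.List.getElem_enumerate]

lemma pv_flat (carts : List (Int × Int × String)) :
    ∀ (grid : List String) (y : Int),
    (((PySem.List.enumerate grid y).map
        (fun q => (PySem.List.enumerate q.2.toList 0).map
          (fun p => pvCell carts p.1 q.1 (String.singleton p.2)))).map
      (fun row => (row.map String.toList).flatten ++ ['\n'])).flatten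
    = pvSpec carts grid y := by
  intro grid
  induction grid with
  | nil => intro y; simp [pvSpec]
  | cons line rest ih =>
      intro y
      rw [PySem.List.enumerate_cons]
      simp only [List.map_cons, List.flatten_cons, ih]
      simp [pvSpec, List.flatMap_def, List.map_map, Function.comp_def, List.append_assoc]

lemma pv_B_char (carts : List (Int × Int × String)) (grid : List String) :
    (show_grid_alt grid carts).toList = pvSpec carts grid 0 := by
  unfold show_grid_alt
  rw [pv_rows_eq carts grid, pv_join_toList]
  have h2 : ∀ row : List String, (PySem.Str.join "" row ++ "\n").toList = (row.map String.toList).flatten ++ ['\n'] := by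
    intro row; simp [pysem, pv_chars_join_nil]
  simp only [List.map_map, Function.comp_def]
  simp only [h2]
  exact pv_flat carts grid 0

theorem pv_main (grid : List String) (carts : List (Int × Int × String)) :
    show_grid grid carts = show_grid_alt grid carts := by
  apply String.toList_inj.mp
  rw [pv_B_char]
  have := pv_A_char carts grid "" 0
  simpa [show_grid] using this

-- ===== VERDICT (by name: the statement is the Claim_ definition above) =====
theorem show_grid_spec : Claim_equal_show_grid := by
  intro grid carts _
  unfold Spec_show_grid
  exact pv_main grid carts
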